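-- pv_equiv track=rewrite | github.com/Yoshanuikabundi/openff-pdbmol | openff/pdbscan/pdb/_utils.py | with_neighbours
-- ===== SOURCE A (Python) =====
-- from typing import Iterable, Iterator, TypeVar
--
-- T = TypeVar("T")
--
-- U = TypeVar("U")
--
-- def with_neighbours(
--     iterable: Iterable[T], default: U = None
-- ) -> Iterator[tuple[T | U, T, T | U]]:
--     iterator = iter(iterable)
--
--     pred: T | U = default
--     this: T
--     succ: T | U
--
--     try:
--         this = next(iterator)
--     except StopIteration:
--         return
--
--     for succ in iterator:
--         yield (pred, this, succ)
--         pred = this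
--         this = succ
--
--     succ = default
--     yield (pred, this, succ)
-- ===== SOURCE B (Python) =====
-- def with_neighbours(iterable, default=None):
--     items = list(iterable)
--     preds = [default] + items[:-1]
--     succs = items[1:] + [default]
--     yield from zip(preds, items, succs)
-- ===== Notes on version B (the rewrite author's own statement) =====
-- stated objective: simpler
-- what changed: Replaces the manual pred/this/succ rotation loop (with its StopIteration priming and trailing yield) by zipping three aligned padded sequences: [default]+items[:-1], items, items[1:]+[default].
import Mathlib
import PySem

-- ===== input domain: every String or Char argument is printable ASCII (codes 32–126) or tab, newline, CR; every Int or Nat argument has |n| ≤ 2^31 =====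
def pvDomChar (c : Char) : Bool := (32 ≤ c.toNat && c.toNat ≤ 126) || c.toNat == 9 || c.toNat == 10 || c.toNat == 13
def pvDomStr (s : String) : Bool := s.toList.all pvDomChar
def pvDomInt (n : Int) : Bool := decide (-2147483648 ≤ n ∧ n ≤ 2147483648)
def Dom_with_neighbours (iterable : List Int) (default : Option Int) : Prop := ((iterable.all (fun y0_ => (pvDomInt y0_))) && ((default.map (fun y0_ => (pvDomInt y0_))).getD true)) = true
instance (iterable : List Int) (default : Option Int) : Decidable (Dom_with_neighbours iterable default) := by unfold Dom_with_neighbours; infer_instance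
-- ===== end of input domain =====

-- ===== PORT A =====
-- B replaces A's pred/this/succ rotation loop by zipping three padded sequences (simpler decomposition; equivalence is about the returned finite sequence).
-- loop over the remaining iterator: yield (pred, this, succ), then rotate state
def withNbrLoop (default : Option Int) (pred : Option Int) (this : Int) :
    List Int → List (Option Int × Int × Option Int)
  | [] => [(pred, this, default)]
  | succ :: rest => (pred, this, some succ) :: withNbrLoop default (some this) succ rest

def with_neighbours (iterable : List Int) (default : Option Int) : List (Option Int × Int × Option Int) :=
  match iterable with
  | [] => []                                  -- next(iterator) raised StopIteration: return
  | this :: rest => withNbrLoop default default this rest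

-- ===== PORT B =====
def with_neighbours_alt (iterable : List Int) (default : Option Int) : List (Option Int × Int × Option Int) :=
  let items := iterable
  let preds := default :: items.dropLast.map some      -- [default] + items[:-1]
  let succs := items.tail.map some ++ [default]        -- items[1:] + [default]
  List.zip preds (List.zip items succs)                -- zip(preds, items, succs)

-- ===== PRECONDITION & SPEC =====
def Spec_with_neighbours (iterable : List Int) (default : Option Int) (out : List (Option Int × Int × Option Int)) : Prop := out = with_neighbours_alt iterable default
instance (iterable : List Int) (default : Option Int) (out : List (Option Int × Int × Option Int)) : Decidable (Spec_with_neighbours iterable default out) := by unfold Spec_with_neighbours; infer_instance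

-- ===== CLAIM (what is proved, stated in full; the proofs are below) =====
def Claim_equal_with_neighbours : Prop := ∀ (iterable : List Int) (default : Option Int), Dom_with_neighbours iterable default → Spec_with_neighbours iterable default (with_neighbours iterable default)

-- ===== LEMMAS AND PROOFS =====
theorem withNbrLoop_eq_zip (default : Option Int) :
    ∀ (rest : List Int) (pred : Option Int) (this : Int),
      withNbrLoop default pred this rest =
        List.zip (pred :: (this :: rest).dropLast.map some)
          (List.zip (this :: rest) (rest.map some ++ [default])) := by
  intro rest
  induction rest with
  | nil => intro pred this; simp [withNbrLoop, List.zip]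
  | cons s rs ih =>
      intro pred this
      simp only [withNbrLoop, ih, List.map, List.zip]
      rfl

-- ===== VERDICT (by name: the statement is the Claim_ definition above) =====
theorem with_neighbours_spec : Claim_equal_with_neighbours := by
  intro iterable default _
  unfold Spec_with_neighbours with_neighbours with_neighbours_alt
  match iterable with
  | [] => rfl
  | this :: rest => simpa using withNbrLoop_eq_zip default rest default this
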